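-- pv_equiv track=rewrite | github.com/talboom/advent-of-code | 2025/day4.py | clean_map
-- ===== SOURCE A (Python) =====
-- def clean_map(map, remove_rolls = False):
--   map_height = len(map)
--   map_width = len(map[0])
--   n_rolls= 0
--
--   for y in range(map_height):
--     for x in range(map_width):
--       xs = max(0,x-1)
--       xe = min(map_width,x+2)
--       ys = max(0,y-1)
--       ye = min(map_height-1,y+1)
--
--       r1 = map[ys][xs:xe] if y > 0 else []
--       r2 = map[y][xs:xe]
--       r3 = map[ye][xs:xe] if y < map_height-1 else []
--       s = sum(c.count('@') for c in [r1,r2,r3])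
--       reachable = map[y][x] == '@' and sum(c.count('@') for c in [r1,r2,r3]) < 5
--       if reachable and remove_rolls:
--         map[y][x] = '*'
--       n_rolls += reachable
--
--   return n_rolls, map
-- ===== SOURCE B (Python) =====
-- def clean_map(map, remove_rolls=False):
--   h = len(map)
--   w = len(map[0])
--   # precompute a 3x3-neighbourhood '@' count grid once (staged: per-row windows, then
--   # vertical sums), and keep it up to date incrementally when cells are removed
--   at = [[1 if map[y][x] == '@' else 0 for x in range(w)] for y in range(h)]
--   rowc = [[sum(at[y][max(0, x - 1):x + 2]) for x in range(w)] for y in range(h)]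
--   cnt = [[(rowc[y - 1][x] if y > 0 else 0) + rowc[y][x]
--           + (rowc[y + 1][x] if y < h - 1 else 0) for x in range(w)] for y in range(h)]
--   n = 0
--   for y in range(h):
--     for x in range(w):
--       if map[y][x] == '@' and cnt[y][x] < 5:
--         n += 1
--         if remove_rolls:
--           map[y][x] = '*'
--           for ny in range(max(0, y - 1), min(h, y + 2)):
--             for nx in range(max(0, x - 1), min(w, x + 2)):
--               cnt[ny][nx] -= 1
--   return n, map
-- ===== Notes on version B (the rewrite author's own statement) =====
-- stated objective: faster
-- what changed: Instead of recounting each cell's 3x3 neighbourhood from three row slices with str-count, B precomputes a neighbourhood-count grid in staged passes (per-row 3-wide window sums, then vertical sums of three row entries) and, when a roll is removed, keeps the grid exact by decrementing the counts of the up-to-9 affected neighbours; the scan then only compares the precomputed count with 5.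
import Mathlib
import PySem

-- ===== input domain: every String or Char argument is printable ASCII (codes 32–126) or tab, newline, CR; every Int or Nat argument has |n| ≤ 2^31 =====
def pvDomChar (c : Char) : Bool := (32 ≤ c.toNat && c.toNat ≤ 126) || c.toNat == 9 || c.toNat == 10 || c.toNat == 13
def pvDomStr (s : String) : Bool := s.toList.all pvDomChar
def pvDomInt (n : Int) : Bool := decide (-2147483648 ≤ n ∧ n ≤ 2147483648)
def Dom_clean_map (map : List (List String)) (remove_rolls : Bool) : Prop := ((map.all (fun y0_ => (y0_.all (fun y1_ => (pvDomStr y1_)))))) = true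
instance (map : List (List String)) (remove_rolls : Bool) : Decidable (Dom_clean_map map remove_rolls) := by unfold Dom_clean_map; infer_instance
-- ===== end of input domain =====

-- B replaces A's per-cell recount (three row slices + str.count) by a neighbourhood-count grid,
-- built once in staged passes and kept exact by decrementing the affected entries when a cell is
-- removed (both Pythons also mutate the argument grid in place when remove_rolls is set; the
-- equivalence proved is about the returned pair).

-- ===== PORT A =====
-- cell lookup map[y][x] (total form; in-range under Pre_clean_map, where Python does not raise)
def pvGet2S (m : List (List String)) (y x : Int) : String :=
  PySem.List.pyGetD (PySem.List.pyGetD m y []) x ""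

-- A's per-cell loop body (the inside of A's nested for-loops), kept as a helper for the fold.
def aCell (H W : Int) (rr : Bool) (st : Int × List (List String)) (y x : Int) :
    Int × List (List String) :=
  let n_rolls := st.1
  let m := st.2
  let xs := max 0 (x - 1)
  let xe := min W (x + 2)
  let ys := max 0 (y - 1)
  let ye := min (H - 1) (y + 1)
  let r1 := if y > 0 then PySem.List.slice (PySem.List.pyGetD m ys []) (some xs) (some xe) else []
  let r2 := PySem.List.slice (PySem.List.pyGetD m y []) (some xs) (some xe)
  let r3 := if y < H - 1 then PySem.List.slice (PySem.List.pyGetD m ye []) (some xs) (some xe) else []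
  let s : Int := ([r1, r2, r3].map (fun c => (PySem.List.count c "@" : Int))).sum
  let reachable : Bool := (pvGet2S m y x == "@") && decide (s < 5)
  let m2 := if reachable && rr then
      PySem.List.pySetD m y (PySem.List.pySetD (PySem.List.pyGetD m y []) x "*")
    else m
  (n_rolls + (if reachable then 1 else 0), m2)

def clean_map (map : List (List String)) (remove_rolls : Bool) : Int × List (List String) :=
  let map_height : Int := map.length
  let map_width : Int := (PySem.List.pyGetD map 0 []).length   -- len(map[0]); map = [] is excluded by Pre_clean_map
  (PySem.List.pyRange 0 map_height 1).foldl (fun st y =>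
    (PySem.List.pyRange 0 map_width 1).foldl (fun st x => aCell map_height map_width remove_rolls st y x) st)
    (0, map)

-- ===== PORT B =====
-- cnt[y][x] lookup (total form; the loops only read in-range entries, where Python does not raise)
def pvGet2 (g : List (List Int)) (y x : Int) : Int :=
  PySem.List.pyGetD (PySem.List.pyGetD g y []) x 0

-- cnt[ny][nx] -= 1 (read-modify-write, as in Source B)
def pvDec (g : List (List Int)) (ny nx : Int) : List (List Int) :=
  PySem.List.pySetD g ny (PySem.List.pySetD (PySem.List.pyGetD g ny []) nx (pvGet2 g ny nx - 1))

-- B's per-cell body: compare the maintained count with 5; on removal decrement the neighbours' counts.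
def bCell (H W : Int) (rr : Bool) (st : Int × List (List String) × List (List Int)) (y x : Int) :
    Int × List (List String) × List (List Int) :=
  let n := st.1
  let m := st.2.1
  let cnt := st.2.2
  if (pvGet2S m y x == "@") && decide (pvGet2 cnt y x < 5) then
    if rr then
      let m' := PySem.List.pySetD m y (PySem.List.pySetD (PySem.List.pyGetD m y []) x "*")
      let cnt' := (PySem.List.pyRange (max 0 (y - 1)) (min H (y + 2)) 1).foldl (fun c ny =>
        (PySem.List.pyRange (max 0 (x - 1)) (min W (x + 2)) 1).foldl (fun c nx => pvDec c ny nx) c) cnt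
      (n + 1, m', cnt')
    else (n + 1, m, cnt)
  else (n, m, cnt)

def clean_map_alt (map : List (List String)) (remove_rolls : Bool) : Int × List (List String) :=
  let h : Int := map.length
  let w : Int := (PySem.List.pyGetD map 0 []).length
  let at_ := (PySem.List.pyRange 0 h 1).map (fun y => (PySem.List.pyRange 0 w 1).map (fun x =>
      if pvGet2S map y x == "@" then (1 : Int) else 0))
  let rowc := (PySem.List.pyRange 0 h 1).map (fun y => (PySem.List.pyRange 0 w 1).map (fun x =>
      (PySem.List.slice (PySem.List.pyGetD at_ y []) (some (max 0 (x - 1))) (some (x + 2))).sum))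
  let cnt := (PySem.List.pyRange 0 h 1).map (fun y => (PySem.List.pyRange 0 w 1).map (fun x =>
      (if y > 0 then pvGet2 rowc (y - 1) x else 0) + pvGet2 rowc y x
        + (if y < h - 1 then pvGet2 rowc (y + 1) x else 0)))
  let st := (PySem.List.pyRange 0 h 1).foldl (fun st y =>
    (PySem.List.pyRange 0 w 1).foldl (fun st x => bCell h w remove_rolls st y x) st)
    (0, map, cnt)
  (st.1, st.2.1)

-- ===== PRECONDITION & SPEC =====
-- Pre_ excludes exactly the inputs on which Python A raises IndexError: the empty grid (map[0])
-- and grids where some row is shorter than row 0 (map[y][x] with x < len(map[0])).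
def Pre_clean_map (map : List (List String)) (remove_rolls : Bool) : Prop :=
  map ≠ [] ∧ ∀ r ∈ map, (map.headD []).length ≤ r.length
instance (map : List (List String)) (remove_rolls : Bool) : Decidable (Pre_clean_map map remove_rolls) := by
  unfold Pre_clean_map; infer_instance

def pvWitness_clean_map : List (List String) × Bool :=
  ([["@", ".", "@"], ["@", "@", "."], [".", "@", "@"]], true)

def Spec_clean_map (map : List (List String)) (remove_rolls : Bool) (out : Int × List (List String)) : Prop := out = clean_map_alt map remove_rolls
instance (map : List (List String)) (remove_rolls : Bool) (out : Int × List (List String)) : Decidable (Spec_clean_map map remove_rolls out) := by unfold Spec_clean_map; infer_instance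

-- ===== CLAIM (what is proved, stated in full; the proofs are below) =====
def Claim_equal_clean_map : Prop := ∀ (map : List (List String)) (remove_rolls : Bool), Dom_clean_map map remove_rolls → Pre_clean_map map remove_rolls → Spec_clean_map map remove_rolls (clean_map map remove_rolls)

-- ===== LEMMAS AND PROOFS =====

-- 0/1 indicator: "column j of row r is inside [0,W) and holds '@'"
def pvInd (r : List String) (W j : Int) : Int :=
  if 0 ≤ j ∧ j < W ∧ PySem.List.pyGetD r j "" == "@" then 1 else 0

-- 0/1 indicator: "cell (i,j) of grid m is in bounds and holds '@'"
def pvBI (m : List (List String)) (H W i j : Int) : Int :=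
  if 0 ≤ i ∧ i < H ∧ 0 ≤ j ∧ j < W ∧ pvGet2S m i j == "@" then 1 else 0

-- the number of '@' in the (clamped) 3x3 neighbourhood of (y,x)
def pvCntSpec (m : List (List String)) (H W y x : Int) : Int :=
  pvBI m H W (y - 1) (x - 1) + pvBI m H W (y - 1) x + pvBI m H W (y - 1) (x + 1)
    + pvBI m H W y (x - 1) + pvBI m H W y x + pvBI m H W y (x + 1)
    + pvBI m H W (y + 1) (x - 1) + pvBI m H W (y + 1) x + pvBI m H W (y + 1) (x + 1)

-- shapes maintained by the loops
def pvMShape (m : List (List String)) (H W : Int) : Prop :=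
  (m.length : Int) = H ∧ ∀ r ∈ m, W ≤ (r.length : Int)

def pvCShape (g : List (List Int)) (H W : Int) : Prop :=
  (g.length : Int) = H ∧ ∀ r ∈ g, (r.length : Int) = W

-- the coupling between A's loop state and B's loop state
def pvRel (H W : Int) (stA : Int × List (List String)) (stB : Int × List (List String) × List (List Int)) : Prop :=
  stA.1 = stB.1 ∧ stA.2 = stB.2.1 ∧ pvMShape stB.2.1 H W ∧ pvCShape stB.2.2 H W ∧
    ∀ i j : Int, 0 ≤ i → i < H → 0 ≤ j → j < W → pvGet2 stB.2.2 i j = pvCntSpec stB.2.1 H W i j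

theorem pvPyGetD_toNat {α : Type} (xs : List α) (i : Int) (d : α) (h : 0 ≤ i) :
    PySem.List.pyGetD xs i d = xs.getD i.toNat d := by
  have h2 := PySem.List.pyGetD_natCast (xs := xs) (n := i.toNat) (d := d)
  rwa [Int.toNat_of_nonneg h] at h2

-- counting '@' in a contiguous window of a row is the sum of per-index indicators
theorem pvCntTake (r : List String) (a k : Nat) :
    (((((r.drop a).take k).count "@" : Nat)) : Int)
      = ((List.range k).map (fun i => if r.getD (a + i) "" == "@" then (1 : Int) else 0)).sum := by
  induction k with
  | zero => simp
  | succ k ih =>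
    rw [List.take_add_one, List.count_append, List.range_succ, List.map_append, List.sum_append]
    push_cast
    rw [ih]
    simp only [List.map_cons, List.map_nil, List.sum_cons, List.sum_nil, add_zero]
    congr 1
    rw [List.getElem?_drop]
    rcases h : r[a + k]? with _ | b
    · simp [List.getD_eq_getElem?_getD, h]
    · simp [List.getD_eq_getElem?_getD, h, List.count_cons]

theorem pvInd_nonneg (r : List String) (W j : Int) (h : 0 ≤ j) :
    pvInd r W j = if j < W ∧ r.getD j.toNat "" == "@" then 1 else 0 := by
  rw [pvInd, pvPyGetD_toNat r j "" h]
  simp [h]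

theorem pvInd_out (r : List String) (W j : Int) (h : j < 0 ∨ W ≤ j) :
    pvInd r W j = 0 := by
  rw [pvInd]
  rcases h with h | h <;> simp <;> omega

-- A's sliced-window count of one row equals the three per-column indicators
theorem pvRowEq (r : List String) (W x : Int) (h3 : 0 ≤ x) (h4 : x < W) :
    ((PySem.List.count (PySem.List.slice r (some (max 0 (x - 1))) (some (min W (x + 2)))) "@" : Nat) : Int)
      = pvInd r W (x - 1) + pvInd r W x + pvInd r W (x + 1) := by
  rw [PySem.List.count_eq, PySem.List.slice_toNat _ (by omega) (by omega), pvCntTake]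
  by_cases hx0 : 0 < x
  · by_cases hxw : x + 2 ≤ W
    · have hk : (min W (x + 2)).toNat - (max 0 (x - 1)).toNat = 3 := by omega
      have ha : (max 0 (x - 1)).toNat = (x - 1).toNat := by omega
      rw [hk, ha, pvInd_nonneg _ _ _ (by omega), pvInd_nonneg _ _ _ (by omega),
        pvInd_nonneg _ _ _ (by omega)]
      have e1 : (x - 1).toNat + 1 = x.toNat := by omega
      have e2 : (x - 1).toNat + 2 = (x + 1).toNat := by omega
      simp only [List.range_succ, List.range_zero, List.map_append, List.map_cons, List.map_nil,
        List.sum_append, List.sum_cons, List.sum_nil, List.nil_append, add_zero, e1, e2]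
      have c1 : x - 1 < W := by omega
      simp [c1, h4, (by omega : x + 1 < W), add_assoc]
    · have hk : (min W (x + 2)).toNat - (max 0 (x - 1)).toNat = 2 := by omega
      have ha : (max 0 (x - 1)).toNat = (x - 1).toNat := by omega
      rw [hk, ha, pvInd_nonneg _ _ _ (by omega), pvInd_nonneg _ _ _ (by omega),
        pvInd_out _ _ _ (by omega)]
      have e1 : (x - 1).toNat + 1 = x.toNat := by omega
      simp only [List.range_succ, List.range_zero, List.map_append, List.map_cons, List.map_nil,
        List.sum_append, List.sum_cons, List.sum_nil, List.nil_append, add_zero, e1]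
      simp [(by omega : x - 1 < W), h4, add_assoc]
  · have hx : x = 0 := by omega
    subst hx
    rw [pvInd_out _ _ _ (by omega), pvInd_nonneg _ _ _ (by omega)]
    by_cases hw : 2 ≤ W
    · have hk : (min W ((0:Int) + 2)).toNat - (max 0 ((0:Int) - 1)).toNat = 2 := by omega
      rw [hk, pvInd_nonneg _ _ _ (by omega)]
      simp only [List.range_succ, List.range_zero, List.map_append, List.map_cons, List.map_nil,
        List.sum_append, List.sum_cons, List.sum_nil, List.nil_append, add_zero]
      simp [h4, (show (1:Int) < W by omega)]
    · have hk : (min W ((0:Int) + 2)).toNat - (max 0 ((0:Int) - 1)).toNat = 1 := by omega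
      rw [hk, pvInd_out _ _ _ (by omega)]
      simp only [List.range_succ, List.range_zero, List.map_append, List.map_cons, List.map_nil,
        List.sum_append, List.sum_cons, List.sum_nil, List.nil_append, add_zero]
      simp [h4]

theorem pvBI_eq_ind (m : List (List String)) (H W i j : Int) (h1 : 0 ≤ i) (h2 : i < H) :
    pvBI m H W i j = pvInd (PySem.List.pyGetD m i []) W j := by
  simp [pvBI, pvInd, pvGet2S, h1, h2, and_assoc]

theorem pvBI_out (m : List (List String)) (H W i j : Int) (h : i < 0 ∨ H ≤ i) :
    pvBI m H W i j = 0 := by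
  rw [pvBI]; rcases h with h | h <;> simp <;> omega

-- A's three-slice '@' count at an in-range cell is the 3x3 neighbourhood count
theorem pvACount (m : List (List String)) (H W y x : Int)
    (h1 : 0 ≤ y) (h2 : y < H) (h3 : 0 ≤ x) (h4 : x < W) :
    ([(if y > 0 then PySem.List.slice (PySem.List.pyGetD m (max 0 (y - 1)) []) (some (max 0 (x - 1))) (some (min W (x + 2))) else []),
      PySem.List.slice (PySem.List.pyGetD m y []) (some (max 0 (x - 1))) (some (min W (x + 2))),
      (if y < H - 1 then PySem.List.slice (PySem.List.pyGetD m (min (H - 1) (y + 1)) []) (some (max 0 (x - 1))) (some (min W (x + 2))) else [])].map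
        (fun c => ((PySem.List.count c "@" : Nat) : Int))).sum
      = pvCntSpec m H W y x := by
  simp only [List.map_cons, List.map_nil, List.sum_cons, List.sum_nil, add_zero]
  have hmid : ((PySem.List.count (PySem.List.slice (PySem.List.pyGetD m y []) (some (max 0 (x - 1))) (some (min W (x + 2)))) "@" : Nat) : Int)
      = pvBI m H W y (x - 1) + pvBI m H W y x + pvBI m H W y (x + 1) := by
    rw [pvBI_eq_ind _ _ _ _ _ h1 h2, pvBI_eq_ind _ _ _ _ _ h1 h2, pvBI_eq_ind _ _ _ _ _ h1 h2,
      pvRowEq _ _ _ h3 h4]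
  have htop : ((PySem.List.count (if y > 0 then PySem.List.slice (PySem.List.pyGetD m (max 0 (y - 1)) []) (some (max 0 (x - 1))) (some (min W (x + 2))) else []) "@" : Nat) : Int)
      = pvBI m H W (y - 1) (x - 1) + pvBI m H W (y - 1) x + pvBI m H W (y - 1) (x + 1) := by
    by_cases hy0 : y > 0
    · rw [if_pos hy0]
      have hm : max 0 (y - 1) = y - 1 := by omega
      rw [pvBI_eq_ind _ _ _ _ _ (by omega) (by omega), pvBI_eq_ind _ _ _ _ _ (by omega) (by omega),
        pvBI_eq_ind _ _ _ _ _ (by omega) (by omega), hm, pvRowEq _ _ _ h3 h4]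
    · rw [if_neg hy0, pvBI_out _ _ _ _ _ (by omega), pvBI_out _ _ _ _ _ (by omega),
        pvBI_out _ _ _ _ _ (by omega)]
      simp [PySem.List.count_eq]
  have hbot : ((PySem.List.count (if y < H - 1 then PySem.List.slice (PySem.List.pyGetD m (min (H - 1) (y + 1)) []) (some (max 0 (x - 1))) (some (min W (x + 2))) else []) "@" : Nat) : Int)
      = pvBI m H W (y + 1) (x - 1) + pvBI m H W (y + 1) x + pvBI m H W (y + 1) (x + 1) := by
    by_cases hyH : y < H - 1
    · rw [if_pos hyH]
      have hm : min (H - 1) (y + 1) = y + 1 := by omega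
      rw [pvBI_eq_ind _ _ _ _ _ (by omega) (by omega), pvBI_eq_ind _ _ _ _ _ (by omega) (by omega),
        pvBI_eq_ind _ _ _ _ _ (by omega) (by omega), hm, pvRowEq _ _ _ h3 h4]
    · rw [if_neg hyH, pvBI_out _ _ _ _ _ (by omega), pvBI_out _ _ _ _ _ (by omega),
        pvBI_out _ _ _ _ _ (by omega)]
      simp [PySem.List.count_eq]
  rw [htop, hmid, hbot, pvCntSpec]
  ring

-- summing a contiguous window of an Int list is the sum of per-index getD values
theorem pvSumTake (r : List Int) (a k : Nat) :
    ((r.drop a).take k).sum = ((List.range k).map (fun i => r.getD (a + i) 0)).sum := by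
  induction k with
  | zero => simp
  | succ k ih =>
    rw [List.take_add_one, List.sum_append, List.range_succ, List.map_append, List.sum_append, ih]
    simp only [List.map_cons, List.map_nil, List.sum_cons, List.sum_nil, add_zero]
    congr 1
    rw [List.getElem?_drop]
    rcases h : r[a + k]? with _ | b
    · simp [List.getD_eq_getElem?_getD, h]
    · simp [List.getD_eq_getElem?_getD, h]

-- 0/1 indicator on an Int row, with bounds
def pvIndI (r : List Int) (W j : Int) : Int :=
  if 0 ≤ j ∧ j < W then r.getD j.toNat 0 else 0

theorem pvIndI_out (r : List Int) (W j : Int) (h : j < 0 ∨ W ≤ j) : pvIndI r W j = 0 := by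
  rw [pvIndI]; rcases h with h | h <;> simp <;> omega

-- B's 3-wide window sum of one row equals the three per-column indicators
theorem pvSliceSum (r : List Int) (W x : Int) (hr : (r.length : Int) = W)
    (h3 : 0 ≤ x) (h4 : x < W) :
    (PySem.List.slice r (some (max 0 (x - 1))) (some (x + 2))).sum
      = pvIndI r W (x - 1) + pvIndI r W x + pvIndI r W (x + 1) := by
  rw [PySem.List.slice_toNat _ (by omega) (by omega), pvSumTake]
  have hg0 : ∀ j : Nat, (W : Int) ≤ j → r.getD j 0 = 0 := by
    intro j hj
    apply List.getD_eq_default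
    omega
  by_cases hx0 : 0 < x
  · have ha : (max 0 (x - 1)).toNat = (x - 1).toNat := by omega
    have hk : (x + 2).toNat - (max 0 (x - 1)).toNat = 3 := by omega
    rw [hk, ha]
    have e1 : (x - 1).toNat + 1 = x.toNat := by omega
    have e2 : (x - 1).toNat + 2 = (x + 1).toNat := by omega
    simp only [List.range_succ, List.range_zero, List.map_append, List.map_cons, List.map_nil,
      List.sum_append, List.sum_cons, List.sum_nil, List.nil_append, add_zero, e1, e2]
    rw [pvIndI, pvIndI, pvIndI, if_pos (by omega : (0:Int) ≤ x - 1 ∧ x - 1 < W),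
      if_pos (⟨h3, h4⟩ : (0:Int) ≤ x ∧ x < W)]
    by_cases hxw : x + 1 < W
    · rw [if_pos (⟨by omega, hxw⟩ : (0:Int) ≤ x + 1 ∧ x + 1 < W)]
    · rw [if_neg (fun hc : (0:Int) ≤ x + 1 ∧ x + 1 < W => hxw hc.2),
        hg0 (x + 1).toNat (by omega)]
  · have hx : x = 0 := by omega
    subst hx
    have hk : ((0:Int) + 2).toNat - (max 0 ((0:Int) - 1)).toNat = 2 := by omega
    have ha : (max 0 ((0:Int) - 1)).toNat = 0 := by omega
    rw [hk, ha, pvIndI_out _ _ _ (by omega), pvIndI, pvIndI]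
    simp only [List.range_succ, List.range_zero, List.map_append, List.map_cons, List.map_nil,
      List.sum_append, List.sum_cons, List.sum_nil, List.nil_append, add_zero, zero_add,
      Int.toNat_zero, Int.toNat_one]
    rw [if_pos (⟨by omega, h4⟩ : (0:Int) ≤ 0 ∧ (0:Int) < W)]
    by_cases hw : (1:Int) < W
    · rw [if_pos (⟨by omega, hw⟩ : (0:Int) ≤ 1 ∧ (1:Int) < W)]
    · rw [if_neg (fun hc : (0:Int) ≤ 1 ∧ (1:Int) < W => hw hc.2), hg0 1 (by omega)]

-- the three staged grids of clean_map_alt, named for the proofs (definitionally the port's lets)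
def pvAt (m : List (List String)) : List (List Int) :=
  (PySem.List.pyRange 0 (m.length : Int) 1).map (fun y =>
    (PySem.List.pyRange 0 ((PySem.List.pyGetD m 0 []).length : Int) 1).map (fun x =>
      if pvGet2S m y x == "@" then (1 : Int) else 0))

def pvRowc (m : List (List String)) : List (List Int) :=
  (PySem.List.pyRange 0 (m.length : Int) 1).map (fun y =>
    (PySem.List.pyRange 0 ((PySem.List.pyGetD m 0 []).length : Int) 1).map (fun x =>
      (PySem.List.slice (PySem.List.pyGetD (pvAt m) y []) (some (max 0 (x - 1))) (some (x + 2))).sum))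

def pvCnt0 (m : List (List String)) : List (List Int) :=
  (PySem.List.pyRange 0 (m.length : Int) 1).map (fun y =>
    (PySem.List.pyRange 0 ((PySem.List.pyGetD m 0 []).length : Int) 1).map (fun x =>
      (if y > 0 then pvGet2 (pvRowc m) (y - 1) x else 0) + pvGet2 (pvRowc m) y x
        + (if y < (m.length : Int) - 1 then pvGet2 (pvRowc m) (y + 1) x else 0)))

-- lookup in a grid built as a map over ranges
theorem pvGridGet (H W : Int) (f : Int → Int → Int) (y x : Int)
    (h1 : 0 ≤ y) (h2 : y < H) (h3 : 0 ≤ x) (h4 : x < W) :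
    pvGet2 ((PySem.List.pyRange 0 H 1).map (fun y =>
      (PySem.List.pyRange 0 W 1).map (fun x => f y x))) y x = f y x := by
  rw [pvGet2, PySem.List.pyGetD_map_pyRange_of_nonneg _ _ _ _ h1 h2,
    PySem.List.pyGetD_map_pyRange_of_nonneg _ _ _ _ h3 h4]

theorem pvGridShape (H W : Int) (hH : 0 ≤ H) (hW : 0 ≤ W) (f : Int → Int → Int) :
    pvCShape ((PySem.List.pyRange 0 H 1).map (fun y =>
      (PySem.List.pyRange 0 W 1).map (fun x => f y x))) H W := by
  constructor
  · rw [List.length_map, PySem.List.length_pyRange_one]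
    omega
  · intro r hr
    obtain ⟨y, _, rfl⟩ := List.mem_map.mp hr
    rw [List.length_map, PySem.List.length_pyRange_one]
    omega

-- the at_ row y is the mapped indicator row, and its pvIndI is pvBI
theorem pvAt_row (m : List (List String)) (y : Int) (h1 : 0 ≤ y) (h2 : y < (m.length : Int)) :
    PySem.List.pyGetD (pvAt m) y []
      = (PySem.List.pyRange 0 ((PySem.List.pyGetD m 0 []).length : Int) 1).map (fun x =>
          if pvGet2S m y x == "@" then (1 : Int) else 0) := by
  rw [pvAt, PySem.List.pyGetD_map_pyRange_of_nonneg _ _ _ _ h1 h2]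

theorem pvIndI_at (m : List (List String)) (y j : Int) (h1 : 0 ≤ y) (h2 : y < (m.length : Int)) :
    pvIndI ((PySem.List.pyRange 0 ((PySem.List.pyGetD m 0 []).length : Int) 1).map (fun x =>
        if pvGet2S m y x == "@" then (1 : Int) else 0))
      ((PySem.List.pyGetD m 0 []).length : Int) j
      = pvBI m (m.length : Int) ((PySem.List.pyGetD m 0 []).length : Int) y j := by
  rw [pvIndI, pvBI]
  by_cases hj : 0 ≤ j ∧ j < ((PySem.List.pyGetD m 0 []).length : Int)
  · rw [if_pos hj]
    have : ((PySem.List.pyRange 0 ((PySem.List.pyGetD m 0 []).length : Int) 1).map (fun x =>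
        if pvGet2S m y x == "@" then (1 : Int) else 0)).getD j.toNat 0
        = if pvGet2S m y j == "@" then (1 : Int) else 0 := by
      rw [← pvPyGetD_toNat _ _ _ hj.1,
        PySem.List.pyGetD_map_pyRange_of_nonneg _ _ _ _ hj.1 hj.2]
    rw [this]
    by_cases hc : pvGet2S m y j == "@"
    · rw [if_pos hc, if_pos ⟨h1, h2, hj.1, hj.2, hc⟩]
    · rw [if_neg hc, if_neg (by tauto)]
  · rw [if_neg hj, if_neg (by tauto)]

theorem pvRowc_get (m : List (List String)) (y x : Int)
    (h1 : 0 ≤ y) (h2 : y < (m.length : Int))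
    (h3 : 0 ≤ x) (h4 : x < ((PySem.List.pyGetD m 0 []).length : Int)) :
    pvGet2 (pvRowc m) y x
      = pvBI m (m.length : Int) ((PySem.List.pyGetD m 0 []).length : Int) y (x - 1)
        + pvBI m (m.length : Int) ((PySem.List.pyGetD m 0 []).length : Int) y x
        + pvBI m (m.length : Int) ((PySem.List.pyGetD m 0 []).length : Int) y (x + 1) := by
  rw [pvRowc, pvGridGet _ _ _ _ _ h1 h2 h3 h4, pvAt_row _ _ h1 h2,
    pvSliceSum _ _ _ (by rw [List.length_map, PySem.List.length_pyRange_one]; omega) h3 h4,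
    pvIndI_at _ _ _ h1 h2, pvIndI_at _ _ _ h1 h2, pvIndI_at _ _ _ h1 h2]

-- the initial count grid is exact
theorem pvCnt0_get (m : List (List String)) (y x : Int)
    (h1 : 0 ≤ y) (h2 : y < (m.length : Int))
    (h3 : 0 ≤ x) (h4 : x < ((PySem.List.pyGetD m 0 []).length : Int)) :
    pvGet2 (pvCnt0 m) y x
      = pvCntSpec m (m.length : Int) ((PySem.List.pyGetD m 0 []).length : Int) y x := by
  rw [pvCnt0, pvGridGet _ _ _ _ _ h1 h2 h3 h4, pvCntSpec,
    pvRowc_get _ _ _ h1 h2 h3 h4]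
  by_cases hy0 : y > 0
  · rw [if_pos hy0, pvRowc_get _ _ _ (by omega) (by omega) h3 h4]
    by_cases hyh : y < (m.length : Int) - 1
    · rw [if_pos hyh, pvRowc_get _ _ _ (by omega) (by omega) h3 h4]
      ring
    · rw [if_neg hyh, pvBI_out _ _ _ (y + 1) (x - 1) (by omega), pvBI_out _ _ _ (y + 1) x (by omega),
        pvBI_out _ _ _ (y + 1) (x + 1) (by omega)]
      ring
  · rw [if_neg hy0, pvBI_out _ _ _ (y - 1) (x - 1) (by omega), pvBI_out _ _ _ (y - 1) x (by omega),
      pvBI_out _ _ _ (y - 1) (x + 1) (by omega)]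
    by_cases hyh : y < (m.length : Int) - 1
    · rw [if_pos hyh, pvRowc_get _ _ _ (by omega) (by omega) h3 h4]
      ring
    · rw [if_neg hyh, pvBI_out _ _ _ (y + 1) (x - 1) (by omega), pvBI_out _ _ _ (y + 1) x (by omega),
        pvBI_out _ _ _ (y + 1) (x + 1) (by omega)]
      ring

-- lookup after List.set, on a Nat-cast set index and a nonnegative lookup index
theorem pvGetD_set {α : Type} (xs : List α) (n : Nat) (hn : n < xs.length) (v d : α)
    (i : Int) (hi : 0 ≤ i) :
    PySem.List.pyGetD (PySem.List.pySetD xs ((n : Nat) : Int) v) i d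
      = if i = ((n : Nat) : Int) then v else PySem.List.pyGetD xs i d := by
  rw [PySem.List.pySetD_natCast, pvPyGetD_toNat _ _ _ hi, pvPyGetD_toNat _ _ _ hi,
    List.getD_eq_getElem?_getD, List.getD_eq_getElem?_getD, List.getElem?_set]
  by_cases h : i = ((n : Nat) : Int)
  · rw [if_pos h, if_pos (by omega : n = i.toNat), if_pos hn]
    rfl
  · rw [if_neg h, if_neg (by omega : ¬ n = i.toNat)]

-- writing one cell of a 2-D grid changes exactly that cell (nonnegative lookup indices)
theorem pvSet2_get {α : Type} (g : List (List α)) (dr : List α) (dv : α) (H W y x : Int)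
    (hlen : (g.length : Int) = H) (hrowlen : ∀ r ∈ g, W ≤ (r.length : Int))
    (h1 : 0 ≤ y) (h2 : y < H) (h3 : 0 ≤ x) (h4 : x < W) (v : α)
    (i j : Int) (hi : 0 ≤ i) (hj : 0 ≤ j) :
    PySem.List.pyGetD (PySem.List.pyGetD
        (PySem.List.pySetD g y (PySem.List.pySetD (PySem.List.pyGetD g y dr) x v)) i dr) j dv
      = if i = y ∧ j = x then v else PySem.List.pyGetD (PySem.List.pyGetD g i dr) j dv := by
  have hylen : y.toNat < g.length := by omega
  have hrowmem : PySem.List.pyGetD g y dr ∈ g := by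
    rw [PySem.List.pyGetD_eq_getElem _ _ h1 (by omega)]
    exact List.getElem_mem _
  have hxlen : x.toNat < (PySem.List.pyGetD g y dr).length := by
    have := hrowlen _ hrowmem
    omega
  have hyn : y = ((y.toNat : Nat) : Int) := (Int.toNat_of_nonneg h1).symm
  have hxn : x = ((x.toNat : Nat) : Int) := (Int.toNat_of_nonneg h3).symm
  rw [hyn, hxn] at hxlen ⊢
  rw [pvGetD_set g y.toNat (by omega) _ dr i hi]
  by_cases hci : i = ((y.toNat : Nat) : Int)
  · rw [if_pos hci, pvGetD_set _ x.toNat hxlen v dv j hj]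
    by_cases hcj : j = ((x.toNat : Nat) : Int)
    · rw [if_pos hcj, if_pos ⟨hci, hcj⟩]
    · rw [if_neg hcj, if_neg (fun hc => hcj hc.2), hci]
  · rw [if_neg hci, if_neg (fun hc => hci hc.1)]

-- setting map[y][x] := "*" changes exactly that cell
theorem pvSetCell (m : List (List String)) (H W y x : Int) (sh : pvMShape m H W)
    (h1 : 0 ≤ y) (h2 : y < H) (h3 : 0 ≤ x) (h4 : x < W)
    (i j : Int) (hi : 0 ≤ i) (hj : 0 ≤ j) :
    pvGet2S (PySem.List.pySetD m y (PySem.List.pySetD (PySem.List.pyGetD m y []) x "*")) i j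
      = if i = y ∧ j = x then "*" else pvGet2S m i j := by
  exact pvSet2_get m [] "" H W y x sh.1 sh.2 h1 h2 h3 h4 "*" i j hi hj

-- effect of the removal on the 0/1 cell indicators
theorem pvBI_update (m : List (List String)) (H W y x : Int) (sh : pvMShape m H W)
    (h1 : 0 ≤ y) (h2 : y < H) (h3 : 0 ≤ x) (h4 : x < W)
    (hat : pvGet2S m y x = "@") (i j : Int) :
    pvBI (PySem.List.pySetD m y (PySem.List.pySetD (PySem.List.pyGetD m y []) x "*")) H W i j
      = pvBI m H W i j - (if i = y ∧ j = x then 1 else 0) := by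
  by_cases hb : 0 ≤ i ∧ i < H ∧ 0 ≤ j ∧ j < W
  · rw [pvBI, pvBI, pvSetCell m H W y x sh h1 h2 h3 h4 i j hb.1 hb.2.2.1]
    by_cases hij : i = y ∧ j = x
    · rw [if_pos hij, if_pos hij]
      rw [if_neg (by simp), if_pos ⟨hb.1, hb.2.1, hb.2.2.1, hb.2.2.2, by simp [hij.1, hij.2, hat]⟩]
      omega
    · rw [if_neg hij, if_neg hij]
      ring
  · rw [if_neg (fun hc => hb (by rw [hc.1, hc.2]; exact ⟨h1, h2, h3, h4⟩)),
      pvBI, pvBI, if_neg (by tauto), if_neg (by tauto)]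
    ring

-- the nine exclusive cell-match indicators add up to the 3x3-box indicator
theorem pvNineInd (y x i j : Int) :
    (if i - 1 = y ∧ j - 1 = x then (1:Int) else 0) + (if i - 1 = y ∧ j = x then 1 else 0)
      + (if i - 1 = y ∧ j + 1 = x then 1 else 0) + (if i = y ∧ j - 1 = x then 1 else 0)
      + (if i = y ∧ j = x then 1 else 0) + (if i = y ∧ j + 1 = x then 1 else 0)
      + (if i + 1 = y ∧ j - 1 = x then 1 else 0) + (if i + 1 = y ∧ j = x then 1 else 0)
      + (if i + 1 = y ∧ j + 1 = x then 1 else 0)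
      = if y - 1 ≤ i ∧ i ≤ y + 1 ∧ x - 1 ≤ j ∧ j ≤ x + 1 then 1 else 0 := by
  split_ifs <;> omega

-- effect of the removal on the neighbourhood counts
theorem pvCntSpec_update (m : List (List String)) (H W y x : Int) (sh : pvMShape m H W)
    (h1 : 0 ≤ y) (h2 : y < H) (h3 : 0 ≤ x) (h4 : x < W)
    (hat : pvGet2S m y x = "@") (i j : Int) :
    pvCntSpec (PySem.List.pySetD m y (PySem.List.pySetD (PySem.List.pyGetD m y []) x "*")) H W i j
      = pvCntSpec m H W i j - (if y - 1 ≤ i ∧ i ≤ y + 1 ∧ x - 1 ≤ j ∧ j ≤ x + 1 then 1 else 0) := by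
  rw [pvCntSpec, pvCntSpec,
    pvBI_update m H W y x sh h1 h2 h3 h4 hat (i - 1) (j - 1),
    pvBI_update m H W y x sh h1 h2 h3 h4 hat (i - 1) j,
    pvBI_update m H W y x sh h1 h2 h3 h4 hat (i - 1) (j + 1),
    pvBI_update m H W y x sh h1 h2 h3 h4 hat i (j - 1),
    pvBI_update m H W y x sh h1 h2 h3 h4 hat i j,
    pvBI_update m H W y x sh h1 h2 h3 h4 hat i (j + 1),
    pvBI_update m H W y x sh h1 h2 h3 h4 hat (i + 1) (j - 1),
    pvBI_update m H W y x sh h1 h2 h3 h4 hat (i + 1) j,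
    pvBI_update m H W y x sh h1 h2 h3 h4 hat (i + 1) (j + 1)]
  have h9 := pvNineInd y x i j
  linarith

-- setting map[y][x] := "*" preserves the grid shape
theorem pvMShape_set (m : List (List String)) (H W y x : Int) (sh : pvMShape m H W)
    (h1 : 0 ≤ y) (h2 : y < H) :
    pvMShape (PySem.List.pySetD m y (PySem.List.pySetD (PySem.List.pyGetD m y []) x "*")) H W := by
  obtain ⟨hlen, hrow⟩ := sh
  have hrowmem : PySem.List.pyGetD m y [] ∈ m := by
    rw [PySem.List.pyGetD_eq_getElem _ _ h1 (by omega)]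
    exact List.getElem_mem _
  rw [pvMShape, PySem.List.pySetD_of_nonneg _ _ h1]
  constructor
  · rw [List.length_set]
    exact hlen
  · intro r hr
    rcases List.mem_or_eq_of_mem_set hr with hm | rfl
    · exact hrow _ hm
    · rw [PySem.List.length_pySetD]
      exact hrow _ hrowmem

-- cnt[ny][nx] -= 1 changes exactly that entry
theorem pvDec_get (g : List (List Int)) (H W ny nx : Int) (sh : pvCShape g H W)
    (h1 : 0 ≤ ny) (h2 : ny < H) (h3 : 0 ≤ nx) (h4 : nx < W)
    (i j : Int) (hi : 0 ≤ i) (hj : 0 ≤ j) :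
    pvGet2 (pvDec g ny nx) i j = pvGet2 g i j - (if i = ny ∧ j = nx then 1 else 0) := by
  unfold pvDec pvGet2
  rw [pvSet2_get g [] 0 H W ny nx sh.1 (fun r hr => le_of_eq (sh.2 r hr).symm)
      h1 h2 h3 h4 _ i j hi hj]
  by_cases hij : i = ny ∧ j = nx
  · rw [if_pos hij, if_pos hij, hij.1, hij.2]
  · rw [if_neg hij, if_neg hij]
    ring

theorem pvDec_shape (g : List (List Int)) (H W ny nx : Int) (sh : pvCShape g H W)
    (h1 : 0 ≤ ny) (h2 : ny < H) :
    pvCShape (pvDec g ny nx) H W := by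
  obtain ⟨hlen, hrow⟩ := sh
  have hrowmem : PySem.List.pyGetD g ny [] ∈ g := by
    rw [PySem.List.pyGetD_eq_getElem _ _ h1 (by omega)]
    exact List.getElem_mem _
  rw [pvDec, pvCShape, PySem.List.pySetD_of_nonneg _ _ h1]
  constructor
  · rw [List.length_set]
    exact hlen
  · intro r hr
    rcases List.mem_or_eq_of_mem_set hr with hm | rfl
    · exact hrow _ hm
    · rw [PySem.List.length_pySetD]
      exact hrow _ hrowmem

-- one row of B's decrement loop subtracts the row-window indicator
theorem pvDecRow (H W ny b : Int) (h1 : 0 ≤ ny) (h2 : ny < H) (hb : b ≤ W) :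
    ∀ (k : Nat) (a : Int), 0 ≤ a → (b - a).toNat = k → ∀ g, pvCShape g H W →
      pvCShape ((PySem.List.pyRange a b 1).foldl (fun c nx => pvDec c ny nx) g) H W ∧
      ∀ i j : Int, 0 ≤ i → 0 ≤ j → pvGet2 ((PySem.List.pyRange a b 1).foldl (fun c nx => pvDec c ny nx) g) i j
        = pvGet2 g i j - (if i = ny ∧ a ≤ j ∧ j < b then 1 else 0) := by
  intro k
  induction k with
  | zero =>
    intro a ha hk g hg
    rw [PySem.List.pyRange_one_eq_nil (by omega)]
    refine ⟨hg, fun i j _ _ => ?_⟩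
    rw [if_neg (by omega)]
    simp
  | succ k ih =>
    intro a ha hk g hg
    rw [PySem.List.pyRange_one_cons (by omega)]
    simp only [List.foldl_cons]
    obtain ⟨ih1, ih2⟩ := ih (a + 1) (by omega) (by omega) (pvDec g ny a)
      (pvDec_shape g H W ny a hg h1 h2)
    refine ⟨ih1, fun i j hi hj => ?_⟩
    rw [ih2 i j hi hj, pvDec_get g H W ny a hg h1 h2 (by omega) (by omega) i j hi hj]
    split_ifs <;> omega

-- B's full decrement double loop subtracts the 3x3-box indicator
theorem pvDecBox (H W y x : Int) (h1 : 0 ≤ y) (h2 : y < H) (h3 : 0 ≤ x) (h4 : x < W) :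
    ∀ (k : Nat) (a : Int), 0 ≤ a → (min H (y + 2) - a).toNat = k → ∀ g, pvCShape g H W →
      pvCShape ((PySem.List.pyRange a (min H (y + 2)) 1).foldl (fun c ny =>
        (PySem.List.pyRange (max 0 (x - 1)) (min W (x + 2)) 1).foldl (fun c nx => pvDec c ny nx) c) g) H W ∧
      ∀ i j : Int, 0 ≤ i → 0 ≤ j → pvGet2 ((PySem.List.pyRange a (min H (y + 2)) 1).foldl (fun c ny =>
          (PySem.List.pyRange (max 0 (x - 1)) (min W (x + 2)) 1).foldl (fun c nx => pvDec c ny nx) c) g) i j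
        = pvGet2 g i j
          - (if a ≤ i ∧ i < min H (y + 2) ∧ max 0 (x - 1) ≤ j ∧ j < min W (x + 2) then 1 else 0) := by
  intro k
  induction k with
  | zero =>
    intro a ha hk g hg
    rw [PySem.List.pyRange_one_eq_nil (a := a) (b := min H (y + 2)) (by omega)]
    refine ⟨hg, fun i j _ _ => ?_⟩
    rw [if_neg (by omega)]
    simp
  | succ k ih =>
    intro a ha hk g hg
    rw [PySem.List.pyRange_one_cons (a := a) (b := min H (y + 2)) (by omega)]
    simp only [List.foldl_cons]
    have haH : a < H := by
      have : a < min H (y + 2) := by omega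
      exact lt_of_lt_of_le this (min_le_left _ _)
    obtain ⟨row1, row2⟩ := pvDecRow H W a (min W (x + 2)) ha haH (min_le_left _ _)
      ((min W (x + 2)) - max 0 (x - 1)).toNat (max 0 (x - 1)) (by omega) rfl g hg
    obtain ⟨ih1, ih2⟩ := ih (a + 1) (by omega) (by omega) _ row1
    refine ⟨ih1, fun i j hi hj => ?_⟩
    rw [ih2 i j hi hj, row2 i j hi hj]
    split_ifs <;> omega

-- relation-preserving parallel fold
theorem pvFoldRel {α β : Type} (R : α → β → Prop) (l : List Int)
    (fA : α → Int → α) (fB : β → Int → β)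
    (hstep : ∀ x ∈ l, ∀ a b, R a b → R (fA a x) (fB b x)) :
    ∀ a b, R a b → R (l.foldl fA a) (l.foldl fB b) := by
  induction l with
  | nil => intro a b h; exact h
  | cons z l ih =>
    intro a b h
    simp only [List.foldl_cons]
    exact ih (fun x hx a b h => hstep x (List.mem_cons_of_mem _ hx) a b h)
      (fA a z) (fB b z) (hstep z List.mem_cons_self a b h)

-- the per-cell bodies preserve the coupling at every in-range cell
theorem pvStep (H W : Int) (rr : Bool) (y x : Int)
    (h1 : 0 ≤ y) (h2 : y < H) (h3 : 0 ≤ x) (h4 : x < W)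
    (stA : Int × List (List String)) (stB : Int × List (List String) × List (List Int))
    (hrel : pvRel H W stA stB) :
    pvRel H W (aCell H W rr stA y x) (bCell H W rr stB y x) := by
  obtain ⟨nA, mA⟩ := stA
  obtain ⟨nB, mB, cnt⟩ := stB
  obtain ⟨hn, hm, hsm, hsc, hinv⟩ := hrel
  simp only at hn hm hsm hsc hinv
  subst hn hm
  have hcount := pvACount mA H W y x h1 h2 h3 h4
  have hcnt : pvGet2 cnt y x = pvCntSpec mA H W y x := hinv y x h1 h2 h3 h4
  simp only [aCell, bCell]
  rw [hcount, ← hcnt]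
  by_cases hcond : ((pvGet2S mA y x == "@") && decide (pvGet2 cnt y x < 5)) = true
  · rw [hcond]
    simp only [if_pos, Bool.true_and, if_true]
    have hat : pvGet2S mA y x = "@" := by
      have := (Bool.and_eq_true _ _).mp hcond
      exact eq_of_beq this.1
    have hlt : pvGet2 cnt y x < 5 := by
      have := (Bool.and_eq_true _ _).mp hcond
      exact of_decide_eq_true this.2
    by_cases hrr : rr = true
    · rw [if_pos hrr, if_pos hrr]
      obtain ⟨box1, box2⟩ := pvDecBox H W y x h1 h2 h3 h4
        ((min H (y + 2) - max 0 (y - 1)).toNat) (max 0 (y - 1)) (by omega) rfl cnt hsc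
      refine ⟨rfl, rfl, pvMShape_set mA H W y x hsm h1 h2, box1, fun i j hi1 hi2 hj1 hj2 => ?_⟩
      rw [box2 i j hi1 hj1, hinv i j hi1 hi2 hj1 hj2,
        pvCntSpec_update mA H W y x hsm h1 h2 h3 h4 hat i j]
      split_ifs <;> omega
    · rw [if_neg hrr, if_neg (by simp [hrr])]
      exact ⟨rfl, rfl, hsm, hsc, hinv⟩
  · rw [Bool.not_eq_true] at hcond
    rw [hcond]
    simp only [Bool.false_and, if_false, Bool.false_eq_true, add_zero]
    exact ⟨rfl, rfl, hsm, hsc, hinv⟩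

-- the whole scans agree
theorem pvMain (m : List (List String)) (rr : Bool) (pre : Pre_clean_map m rr) :
    clean_map m rr = clean_map_alt m rr := by
  obtain ⟨hne, hrows⟩ := pre
  have hhead : PySem.List.pyGetD m 0 [] = m.headD [] := by
    cases m with
    | nil => simp [pysem]
    | cons r t => simp [pysem]
  have hshape : pvMShape m (m.length : Int) ((PySem.List.pyGetD m 0 []).length : Int) := by
    refine ⟨rfl, fun r hr => ?_⟩
    rw [hhead]
    exact_mod_cast hrows r hr
  have hrel0 : pvRel (m.length : Int) ((PySem.List.pyGetD m 0 []).length : Int)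
      (0, m) (0, m, pvCnt0 m) := by
    refine ⟨rfl, rfl, hshape, pvGridShape _ _ (by omega) (by omega) _, ?_⟩
    intro i j hi1 hi2 hj1 hj2
    exact pvCnt0_get m i j hi1 hi2 hj1 hj2
  have hfold := pvFoldRel (pvRel (m.length : Int) ((PySem.List.pyGetD m 0 []).length : Int))
    (PySem.List.pyRange 0 (m.length : Int) 1)
    (fun st y => (PySem.List.pyRange 0 ((PySem.List.pyGetD m 0 []).length : Int) 1).foldl
      (fun st x => aCell (m.length : Int) ((PySem.List.pyGetD m 0 []).length : Int) rr st y x) st)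
    (fun st y => (PySem.List.pyRange 0 ((PySem.List.pyGetD m 0 []).length : Int) 1).foldl
      (fun st x => bCell (m.length : Int) ((PySem.List.pyGetD m 0 []).length : Int) rr st y x) st)
    (by
      intro y hy stA stB hrel
      rw [PySem.List.mem_pyRange_one] at hy
      exact pvFoldRel _ _ _ _
        (by
          intro x hx stA stB hrel
          rw [PySem.List.mem_pyRange_one] at hx
          exact pvStep _ _ rr y x hy.1 hy.2 hx.1 hx.2 stA stB hrel)
        stA stB hrel)
    (0, m) (0, m, pvCnt0 m) hrel0
  obtain ⟨e1, e2, _⟩ := hfold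
  show (PySem.List.pyRange 0 (m.length : Int) 1).foldl
      (fun st y => (PySem.List.pyRange 0 ((PySem.List.pyGetD m 0 []).length : Int) 1).foldl
        (fun st x => aCell (m.length : Int) ((PySem.List.pyGetD m 0 []).length : Int) rr st y x) st)
      (0, m)
    = (((PySem.List.pyRange 0 (m.length : Int) 1).foldl
        (fun st y => (PySem.List.pyRange 0 ((PySem.List.pyGetD m 0 []).length : Int) 1).foldl
          (fun st x => bCell (m.length : Int) ((PySem.List.pyGetD m 0 []).length : Int) rr st y x) st)
        (0, m, pvCnt0 m)).1,
      ((PySem.List.pyRange 0 (m.length : Int) 1).foldl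
        (fun st y => (PySem.List.pyRange 0 ((PySem.List.pyGetD m 0 []).length : Int) 1).foldl
          (fun st x => bCell (m.length : Int) ((PySem.List.pyGetD m 0 []).length : Int) rr st y x) st)
        (0, m, pvCnt0 m)).2.1)
  exact Prod.ext e1 e2

-- ===== VERDICT (by name: the statement is the Claim_ definition above) =====
theorem clean_map_spec : Claim_equal_clean_map := by
  intro m rr _ pre
  unfold Spec_clean_map
  exact pvMain m rr pre
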